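-- pv_equiv track=rewrite | github.com/sri443/DSA-Practice-QA | Sliding Window Questions/Subarray of size k.py | hasDistinctSubarray
-- ===== SOURCE A (Python) =====
-- def hasDistinctSubarray(nums, k):
--     freq = set()
--     start = 0
--
--     for end in range(len(nums)):
--
--         while nums[end] in freq:
--             freq.remove(nums[start])
--             start += 1
--
--         freq.add(nums[end])
--
--         if end - start + 1 == k:
--             return True
--
--     return False
-- ===== SOURCE B (Python) =====
-- def hasDistinctSubarray(nums, k):
--     if k <= 0:
--         return False
--     last = {}
--     run = 0
--     for i, x in enumerate(nums):
--         j = last.get(x)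
--         run = run + 1 if j is None else min(run + 1, i - j)
--         last[x] = i
--         if run >= k:
--             return True
--     return False
-- ===== Notes on version B (the rewrite author's own statement) =====
-- stated objective: alternative
-- what changed: Replaces A's shrinking two-pointer window over a set (inner while-loop removing elements) with a single pass that keeps a dictionary of each value's last index and updates the length of the longest distinct run in O(1) per element, returning once that run reaches k.
import Mathlib
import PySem

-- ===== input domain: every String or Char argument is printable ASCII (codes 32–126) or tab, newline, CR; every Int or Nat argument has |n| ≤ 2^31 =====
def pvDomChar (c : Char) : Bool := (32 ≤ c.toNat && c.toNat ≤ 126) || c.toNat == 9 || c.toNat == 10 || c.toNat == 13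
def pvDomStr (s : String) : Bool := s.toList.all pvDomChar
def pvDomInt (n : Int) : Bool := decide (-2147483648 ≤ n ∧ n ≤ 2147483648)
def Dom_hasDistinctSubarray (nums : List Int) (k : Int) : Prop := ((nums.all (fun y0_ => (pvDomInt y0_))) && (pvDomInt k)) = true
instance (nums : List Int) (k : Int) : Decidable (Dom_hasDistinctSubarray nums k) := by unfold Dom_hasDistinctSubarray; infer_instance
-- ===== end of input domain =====

-- B replaces A's shrinking two-pointer window over a set by a one-pass last-occurrence
-- dictionary maintaining the longest distinct run; same return value (alternative decomposition).

-- ===== PORT A =====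
-- the 'while nums[end] in freq: freq.remove(nums[start]); start += 1' loop;
-- fuel (nums.length suffices, proved in the lemmas) only makes the recursion total,
-- and the 'none' arm of remove? (Python KeyError) is unreachable for A's states.
def aShrink (nums : List Int) (x : Int) : PySem.Set Int → Nat → Nat → PySem.Set Int × Nat
  | freq, start, 0 => (freq, start)
  | freq, start, fuel + 1 =>
    if PySem.Set.contains freq x then
      match PySem.Set.remove? freq ((PySem.List.pyGet? nums (start : Int)).getD 0) with
      | some f => aShrink nums x f (start + 1) fuel
      | none => (freq, start)   -- KeyError: unreachable from A's reachable states
    else (freq, start)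

-- 'for end in range(len(nums)): …' with early return
def aGo (nums : List Int) (k : Int) (freq : PySem.Set Int) (start : Nat) (e : Nat) : Bool :=
  if e < nums.length then
    let x := (PySem.List.pyGet? nums (e : Int)).getD 0
    let r := aShrink nums x freq start nums.length
    let freq2 := PySem.Set.add r.1 x
    if (e : Int) - (r.2 : Int) + 1 == k then true
    else aGo nums k freq2 r.2 (e + 1)
  else false
termination_by nums.length - e
decreasing_by omega

def hasDistinctSubarray (nums : List Int) (k : Int) : Bool :=
  aGo nums k PySem.Set.empty 0 0

-- ===== PORT B =====
-- 'for i, x in enumerate(nums): j = last.get(x); run = …; last[x] = i; if run >= k: return True'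
def bGo (nums : List Int) (k : Int) (last : PySem.Dict Int Int) (run : Int) (i : Nat) : Bool :=
  if h : i < nums.length then
    let x := nums[i]
    let run' := match PySem.Dict.get? last x with
      | none => run + 1
      | some j => min (run + 1) ((i : Int) - j)
    let last' := PySem.Dict.insert last x (i : Int)
    if k ≤ run' then true
    else bGo nums k last' run' (i + 1)
  else false
termination_by nums.length - i
decreasing_by omega

def hasDistinctSubarray_alt (nums : List Int) (k : Int) : Bool :=
  if k ≤ 0 then false
  else bGo nums k PySem.Dict.empty 0 0

-- ===== PRECONDITION & SPEC =====
def Spec_hasDistinctSubarray (nums : List Int) (k : Int) (out : Bool) : Prop := out = hasDistinctSubarray_alt nums k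
instance (nums : List Int) (k : Int) (out : Bool) : Decidable (Spec_hasDistinctSubarray nums k out) := by unfold Spec_hasDistinctSubarray; infer_instance

-- ===== CLAIM (what is proved, stated in full; the proofs are below) =====
def Claim_equal_hasDistinctSubarray : Prop := ∀ (nums : List Int) (k : Int), Dom_hasDistinctSubarray nums k → Spec_hasDistinctSubarray nums k (hasDistinctSubarray nums k)

-- ===== LEMMAS AND PROOFS =====

-- invariant of A's outer loop: freq is exactly the (duplicate-free) window nums[start:e]
def AInv (nums : List Int) (e s : Nat) (freq : List Int) : Prop :=
  s ≤ e ∧ e ≤ nums.length ∧ freq.Nodup ∧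
  (∀ v, v ∈ freq ↔ ∃ p, s ≤ p ∧ p < e ∧ nums.getD p 0 = v) ∧
  (∀ p q, s ≤ p → p < q → q < e → nums.getD p 0 ≠ nums.getD q 0)

-- index of the last occurrence of v in nums[0:e] (B's 'last' dictionary, specified)
def lastOcc (nums : List Int) : Nat → Int → Option Nat
  | 0, _ => none
  | e + 1, v => if nums.getD e 0 = v then some e else lastOcc nums e v

theorem lastOcc_eq_some_iff (nums : List Int) (e : Nat) (v : Int) (j : Nat) :
    lastOcc nums e v = some j ↔
      (j < e ∧ nums.getD j 0 = v ∧ ∀ t, j < t → t < e → nums.getD t 0 ≠ v) := by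
  induction e with
  | zero => simp [lastOcc]
  | succ e ih =>
    unfold lastOcc
    by_cases h : nums.getD e 0 = v
    · rw [if_pos h]
      constructor
      · rintro hj
        have : j = e := by cases hj; rfl
        subst this
        exact ⟨by omega, h, by intro t ht1 ht2; omega⟩
      · rintro ⟨h1, h2, h3⟩
        have : j = e := by
          by_contra hne
          exact h3 e (by omega) (by omega) h
        subst this; rfl
    · rw [if_neg h, ih]
      constructor
      · rintro ⟨h1, h2, h3⟩
        refine ⟨by omega, h2, ?_⟩
        intro t ht1 ht2
        by_cases he : t = e
        · subst he; exact h
        · exact h3 t ht1 (by omega)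
      · rintro ⟨h1, h2, h3⟩
        have hje : j ≠ e := by rintro rfl; exact h h2
        exact ⟨by omega, h2, fun t ht1 ht2 => h3 t ht1 (by omega)⟩

theorem shrink_spec (nums : List Int) (x : Int) (e : Nat) (he : e ≤ nums.length) :
    ∀ (fuel : Nat) (freq : PySem.Set Int) (s : Nat), s ≤ e → e - s ≤ fuel →
    AInv nums e s freq →
    s ≤ (aShrink nums x freq s fuel).2 ∧
    AInv nums e (aShrink nums x freq s fuel).2 (aShrink nums x freq s fuel).1 ∧
    (¬ ∃ p, (aShrink nums x freq s fuel).2 ≤ p ∧ p < e ∧ nums.getD p 0 = x) ∧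
    ((aShrink nums x freq s fuel).2 = s ∨
      (s ≤ (aShrink nums x freq s fuel).2 - 1 ∧ (aShrink nums x freq s fuel).2 - 1 < e ∧
        nums.getD ((aShrink nums x freq s fuel).2 - 1) 0 = x)) := by
  intro fuel
  induction fuel with
  | zero =>
    intro freq s hs hf _hinv
    have hse : s = e := by omega
    subst hse
    have hstep : aShrink nums x freq s 0 = (freq, s) := rfl
    rw [hstep]
    exact ⟨le_refl s, _hinv, by rintro ⟨p, h1, h2, _⟩; omega, Or.inl rfl⟩
  | succ fuel ih =>
    intro freq s hs hf hinv
    obtain ⟨hse, hel, hnd, hmem, hwin⟩ := hinv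
    by_cases hc : PySem.Set.contains freq x
    · have hx : x ∈ freq := (PySem.Set.contains_iff freq x).mp hc
      obtain ⟨p, hp1, hp2, hp3⟩ := (hmem x).mp hx
      have hslt : s < e := by omega
      have hy : ((PySem.List.pyGet? nums (s : Int)).getD 0) = nums.getD s 0 := by
        rw [PySem.List.pyGet?_natCast, List.getD_eq_getElem?_getD]
      have ymem : nums.getD s 0 ∈ freq := (hmem _).mpr ⟨s, le_refl s, hslt, rfl⟩
      have hrem := PySem.Set.remove?_of_mem ymem
      have hstep : aShrink nums x freq s (fuel + 1) =
          aShrink nums x (PySem.Set.discard freq (nums.getD s 0)) (s + 1) fuel := by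
        simp only [aShrink, if_pos hc, hy, hrem]
      rw [hstep]
      have hinv' : AInv nums e (s + 1) (PySem.Set.discard freq (nums.getD s 0)) := by
        refine ⟨by omega, hel, PySem.Set.nodup_discard _ _ hnd, ?_, ?_⟩
        · intro v
          rw [PySem.Set.mem_discard]
          constructor
          · rintro ⟨hv, hne⟩
            obtain ⟨q, hq1, hq2, hq3⟩ := (hmem v).mp hv
            have : q ≠ s := by rintro rfl; exact hne hq3.symm
            exact ⟨q, by omega, hq2, hq3⟩
          · rintro ⟨q, hq1, hq2, hq3⟩
            refine ⟨(hmem v).mpr ⟨q, by omega, hq2, hq3⟩, ?_⟩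
            rw [← hq3]
            exact (hwin s q (le_refl s) (by omega) hq2).symm
        · intro a b ha hab hb
          exact hwin a b (by omega) hab hb
      obtain ⟨ih1, ih2, ih3, ih4⟩ :=
        ih (PySem.Set.discard freq (nums.getD s 0)) (s + 1) (by omega) (by omega) hinv'
      refine ⟨by omega, ih2, ih3, ?_⟩
      rcases ih4 with h4 | h4
      · right
        have hps : p = s := by
          by_contra hne
          exact ih3 ⟨p, by omega, hp2, hp3⟩
        refine ⟨by omega, by omega, ?_⟩
        rw [h4]
        simpa [hps] using hp3
      · right
        exact ⟨by omega, h4.2.1, h4.2.2⟩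
    · have hnx : x ∉ freq := fun hmem' => hc ((PySem.Set.contains_iff freq x).mpr hmem')
      have hstep : aShrink nums x freq s (fuel + 1) = (freq, s) := by
        simp only [aShrink, if_neg hc]
      rw [hstep]
      refine ⟨le_refl s, ⟨hse, hel, hnd, hmem, hwin⟩, ?_, Or.inl rfl⟩
      rintro ⟨p, hp1, hp2, hp3⟩
      exact hnx ((hmem x).mpr ⟨p, hp1, hp2, hp3⟩)

theorem step_inv (nums : List Int) (e s' : Nat) (freq' : PySem.Set Int)
    (he : e < nums.length) (hinv' : AInv nums e s' freq')
    (hnone : ¬ ∃ p, s' ≤ p ∧ p < e ∧ nums.getD p 0 = nums.getD e 0) :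
    AInv nums (e + 1) s' (PySem.Set.add freq' (nums.getD e 0)) := by
  obtain ⟨hse, _hel, hnd, hmem, hwin⟩ := hinv'
  refine ⟨by omega, by omega, PySem.Set.nodup_add _ _ hnd, ?_, ?_⟩
  · intro v
    rw [PySem.Set.mem_add]
    constructor
    · rintro (hv | rfl)
      · obtain ⟨q, hq1, hq2, hq3⟩ := (hmem v).mp hv
        exact ⟨q, hq1, by omega, hq3⟩
      · exact ⟨e, by omega, by omega, rfl⟩
    · rintro ⟨q, hq1, hq2, hq3⟩
      by_cases hq : q = e
      · subst hq; exact Or.inr hq3.symm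
      · exact Or.inl ((hmem v).mpr ⟨q, hq1, by omega, hq3⟩)
  · intro a b ha hab hb
    by_cases hbe : b = e
    · subst hbe
      intro hcon
      exact hnone ⟨a, ha, hab, hcon⟩
    · exact hwin a b ha hab (by omega)

theorem aGo_false (nums : List Int) (k : Int) (hk : k ≤ 0) :
    ∀ (fuel e s : Nat) (freq : PySem.Set Int), nums.length - e ≤ fuel →
    AInv nums e s freq → aGo nums k freq s e = false := by
  intro fuel
  induction fuel with
  | zero =>
    intro e s freq hf _
    rw [aGo, if_neg (by omega)]
  | succ fuel ih =>
    intro e s freq hf hinv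
    by_cases he : e < nums.length
    · have hx : (PySem.List.pyGet? nums (e : Int)).getD 0 = nums.getD e 0 := by
        rw [PySem.List.pyGet?_natCast, List.getD_eq_getElem?_getD]
      have hsp := shrink_spec nums (nums.getD e 0) e (by omega) nums.length freq s
        hinv.1 (by omega) hinv
      obtain ⟨hss', hinv', hnone, _⟩ := hsp
      have hs'e : (aShrink nums (nums.getD e 0) freq s nums.length).2 ≤ e := hinv'.1
      have hchk : ((e : Int) - ((aShrink nums (nums.getD e 0) freq s nums.length).2 : Int) + 1 == k) = false := by
        rw [beq_eq_false_iff_ne]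
        have : ((aShrink nums (nums.getD e 0) freq s nums.length).2 : Int) ≤ (e : Int) := by
          exact_mod_cast Int.ofNat_le.mpr hs'e
        omega
      rw [aGo, if_pos he]
      simp only [hx, hchk, if_false, Bool.false_eq_true]
      exact ih (e + 1) _ _ (by omega) (step_inv nums e _ _ he hinv' hnone)
    · rw [aGo, if_neg he]

theorem go_eq (nums : List Int) (k : Int) :
    ∀ (fuel e s : Nat) (freq : PySem.Set Int) (last : PySem.Dict Int Int),
    nums.length - e ≤ fuel →
    AInv nums e s freq →
    ((e : Int) - (s : Int) ≤ k - 1) →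
    (∀ v, PySem.Dict.get? last v = (lastOcc nums e v).map (Nat.cast : Nat → Int)) →
    aGo nums k freq s e = bGo nums k last ((e : Int) - (s : Int)) e := by
  intro fuel
  induction fuel with
  | zero =>
    intro e s freq last hf _ _ _
    rw [aGo, if_neg (by omega), bGo, dif_neg (by omega)]
  | succ fuel ih =>
    intro e s freq last hf hinv hrun hlast
    by_cases he : e < nums.length
    · have hx : (PySem.List.pyGet? nums (e : Int)).getD 0 = nums.getD e 0 := by
        rw [PySem.List.pyGet?_natCast, List.getD_eq_getElem?_getD]
      have hgx : nums[e] = nums.getD e 0 := (List.getD_eq_getElem nums 0 he).symm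
      have hsp := shrink_spec nums (nums.getD e 0) e (by omega) nums.length freq s
        hinv.1 (by omega) hinv
      set r := aShrink nums (nums.getD e 0) freq s nums.length with hr
      obtain ⟨hss', hinv', hnone, hdisj⟩ := hsp
      have hs'e : r.2 ≤ e := hinv'.1
      have hcs : (s : Int) ≤ (r.2 : Int) := by exact_mod_cast hss'
      have hce : (r.2 : Int) ≤ (e : Int) := by exact_mod_cast hs'e
      have hwin := hinv.2.2.2.2
      -- B's run update computes exactly the new window length e - r.2 + 1
      have hB : bGo nums k last ((e : Int) - (s : Int)) e =
          (if k ≤ (e : Int) - (r.2 : Int) + 1 then true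
           else bGo nums k (PySem.Dict.insert last (nums.getD e 0) (e : Int))
             ((e : Int) - (r.2 : Int) + 1) (e + 1)) := by
        by_cases hxin : ∃ p, s ≤ p ∧ p < e ∧ nums.getD p 0 = nums.getD e 0
        · obtain ⟨p, hp1, hp2, hp3⟩ := hxin
          have hps : p < r.2 := by
            by_contra hcon
            exact hnone ⟨p, by omega, hp2, hp3⟩
          have hs'eq : r.2 = p + 1 := by
            rcases hdisj with h | ⟨h1, h2, h3⟩
            · omega
            · rcases lt_trichotomy (r.2 - 1) p with hlt | heq | hgt
              · exact absurd (by rw [h3, hp3]) (hwin (r.2 - 1) p h1 hlt hp2)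
              · omega
              · exact absurd (by rw [h3, hp3]) (hwin p (r.2 - 1) hp1 hgt h2).symm.elim
            
          have hlo : lastOcc nums e (nums.getD e 0) = some p := by
            rw [lastOcc_eq_some_iff]
            exact ⟨hp2, hp3, fun t ht1 ht2 hcon =>
              hwin p t hp1 ht1 ht2 (hp3.trans hcon.symm)⟩
          have hcp : (p : Int) = (r.2 : Int) - 1 := by
            have : ((p : Nat) : Int) + 1 = (r.2 : Int) := by exact_mod_cast hs'eq.symm
            omega
          have hcps : (s : Int) ≤ (p : Int) := by exact_mod_cast hp1
          rw [bGo, dif_pos he]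
          simp only [hgx, hlast, hlo, Option.map_some]
          rw [min_eq_right (by omega)]
          have : (e : Int) - (p : Int) = (e : Int) - (r.2 : Int) + 1 := by omega
          rw [this]
        · have hs'eq : r.2 = s := by
            rcases hdisj with h | ⟨h1, h2, h3⟩
            · exact h
            · exact absurd ⟨r.2 - 1, h1, h2, h3⟩ hxin
          have hceq : (r.2 : Int) = (s : Int) := by exact_mod_cast hs'eq
          cases hloc : lastOcc nums e (nums.getD e 0) with
          | none =>
            rw [bGo, dif_pos he]
            simp only [hgx, hlast, hloc, Option.map_none]
            rw [show (e : Int) - (s : Int) + 1 = (e : Int) - (r.2 : Int) + 1 by omega]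
          | some j =>
            obtain ⟨hj1, hj2, _⟩ := (lastOcc_eq_some_iff nums e _ j).mp hloc
            have hjs : j < s := by
              by_contra hcon
              exact hxin ⟨j, by omega, hj1, hj2⟩
            have hcj : (j : Int) < (s : Int) := by exact_mod_cast hjs
            rw [bGo, dif_pos he]
            simp only [hgx, hlast, hloc, Option.map_some]
            rw [min_eq_left (by omega)]
            rw [show (e : Int) - (s : Int) + 1 = (e : Int) - (r.2 : Int) + 1 by omega]
      -- unfold one step of A and compare
      rw [aGo, if_pos he]
      simp only [hx, ← hr]
      rw [hB]
      by_cases hkeq : (e : Int) - (r.2 : Int) + 1 = k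
      · rw [if_pos (beq_iff_eq.mpr hkeq), if_pos (le_of_eq hkeq.symm)]
      · rw [if_neg (by simpa using hkeq), if_neg (by omega)]
        have hlast' : ∀ v, PySem.Dict.get? (PySem.Dict.insert last (nums.getD e 0) (e : Int)) v =
            (lastOcc nums (e + 1) v).map (Nat.cast : Nat → Int) := by
          intro v
          rw [PySem.Dict.get?_insert]
          by_cases hv : v = nums.getD e 0
          · rw [if_pos hv]
            have h1 : lastOcc nums (e + 1) v = some e := by
              rw [show lastOcc nums (e + 1) v =
                if nums.getD e 0 = v then some e else lastOcc nums e v from rfl, if_pos hv.symm]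
            rw [h1, Option.map_some]
          · rw [if_neg hv]
            have h1 : lastOcc nums (e + 1) v = lastOcc nums e v := by
              rw [show lastOcc nums (e + 1) v =
                if nums.getD e 0 = v then some e else lastOcc nums e v from rfl,
                if_neg (fun h => hv h.symm)]
            rw [h1, hlast]
        have hstep := step_inv nums e r.2 r.1 he hinv' hnone
        have hcast : (e : Int) - (r.2 : Int) + 1 = ((e + 1 : Nat) : Int) - (r.2 : Int) := by
          push_cast; ring
        rw [hcast]
        exact ih (e + 1) r.2 (PySem.Set.add r.1 (nums.getD e 0))
          (PySem.Dict.insert last (nums.getD e 0) (e : Int)) (by omega) hstep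
          (by push_cast; omega) hlast'
    · rw [aGo, if_neg he, bGo, dif_neg he]

-- ===== VERDICT (by name: the statement is the Claim_ definition above) =====
theorem hasDistinctSubarray_spec : Claim_equal_hasDistinctSubarray := by
  intro nums k _
  unfold Spec_hasDistinctSubarray hasDistinctSubarray hasDistinctSubarray_alt
  by_cases hk : k ≤ 0
  · rw [if_pos hk]
    exact aGo_false nums k hk nums.length 0 0 PySem.Set.empty (by omega)
      ⟨Nat.zero_le 0, Nat.zero_le _, List.nodup_nil, by simp [PySem.Set.empty], by omega⟩
  · rw [if_neg hk]
    have h := go_eq nums k nums.length 0 0 PySem.Set.empty PySem.Dict.empty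
      (by omega)
      ⟨Nat.le_refl 0, Nat.zero_le _, List.nodup_nil, by simp [PySem.Set.empty], by omega⟩
      (by omega)
      (by intro v; simp [lastOcc, PySem.Dict.get?_empty])
    simpa using h
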